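-- pv_equiv track=rewrite | github.com/Antoine-Meloche/Advent-of-Code | 2023/day-11/day-11.py | fast_short_dist
-- ===== SOURCE A (Python) =====
-- def fast_short_dist(start: tuple[int, int], end: tuple[int, int], expansion_multiplier: int = 0, empty_rows: list[int] = [], empty_cols: list[int] = []) -> int:
--     dist_no_expansion = abs(start[0] - end[0]) + abs(start[1] - end[1])
--     if not expansion_multiplier:
--         return dist_no_expansion
--
--     minmax_rows = sorted((start[0], end[0]))
--     minmax_cols = sorted((start[1], end[1]))
--
--     expansions = 0
--
--     for row in range(*minmax_rows):
--         if row in empty_rows: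
--             expansions += 1
--     for col in range(*minmax_cols):
--         if col in empty_cols:
--             expansions += 1
--
--     final_dist = dist_no_expansion + expansions * expansion_multiplier
--     return final_dist
-- ===== SOURCE B (Python) =====
-- def fast_short_dist(start: tuple[int, int], end: tuple[int, int], expansion_multiplier: int = 0, empty_rows: list[int] = [], empty_cols: list[int] = []) -> int:
--     dist_no_expansion = abs(start[0] - end[0]) + abs(start[1] - end[1])
--     if not expansion_multiplier:
--         return dist_no_expansion
--
--     lo_r, hi_r = min(start[0], end[0]), max(start[0], end[0])
--     lo_c, hi_c = min(start[1], end[1]), max(start[1], end[1])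
--
--     expansions = sum(1 for r in set(empty_rows) if lo_r <= r < hi_r)
--     expansions += sum(1 for c in set(empty_cols) if lo_c <= c < hi_c)
--
--     return dist_no_expansion + expansions * expansion_multiplier
-- ===== Notes on version B (the rewrite author's own statement) =====
-- stated objective: faster
-- what changed: Counts expansions by scanning the deduplicated lists of empty rows/cols and testing interval membership, instead of walking the full dense coordinate range and doing a linear list-membership scan at each step.
import Mathlib
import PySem

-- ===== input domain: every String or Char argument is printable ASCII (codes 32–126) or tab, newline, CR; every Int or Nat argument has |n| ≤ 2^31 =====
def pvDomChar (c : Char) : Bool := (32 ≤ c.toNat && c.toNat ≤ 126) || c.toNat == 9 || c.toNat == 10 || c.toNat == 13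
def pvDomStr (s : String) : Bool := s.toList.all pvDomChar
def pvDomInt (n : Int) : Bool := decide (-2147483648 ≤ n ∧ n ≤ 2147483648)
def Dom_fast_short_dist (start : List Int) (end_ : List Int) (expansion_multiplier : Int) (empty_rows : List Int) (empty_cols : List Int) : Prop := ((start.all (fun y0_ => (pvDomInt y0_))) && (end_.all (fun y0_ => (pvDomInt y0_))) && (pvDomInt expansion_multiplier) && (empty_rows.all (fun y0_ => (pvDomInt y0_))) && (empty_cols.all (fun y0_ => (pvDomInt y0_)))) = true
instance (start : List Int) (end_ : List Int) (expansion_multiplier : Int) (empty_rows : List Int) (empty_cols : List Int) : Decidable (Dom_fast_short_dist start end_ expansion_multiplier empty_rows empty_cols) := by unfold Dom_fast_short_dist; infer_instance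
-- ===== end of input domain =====

-- B replaces the dense scans over range(min,max) (with a linear membership test at each
-- step) by one pass over each deduplicated list of empty lines, counting those inside
-- the interval; objective: faster (the counting pass is over the sparse lists, not the span).

-- ===== PORT A =====
def fast_short_dist (start : List Int) (end_ : List Int) (expansion_multiplier : Int) (empty_rows : List Int) (empty_cols : List Int) : Int :=
  let s0 := PySem.List.pyGetD start 0 0
  let s1 := PySem.List.pyGetD start 1 0
  let e0 := PySem.List.pyGetD end_ 0 0
  let e1 := PySem.List.pyGetD end_ 1 0
  let dist_no_expansion := |s0 - e0| + |s1 - e1|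
  if expansion_multiplier == 0 then dist_no_expansion
  else
    -- sorted((start[0], end[0])) on a pair is its (min, max)
    let minmax_rows := if s0 ≤ e0 then (s0, e0) else (e0, s0)
    let minmax_cols := if s1 ≤ e1 then (s1, e1) else (e1, s1)
    let expansions : Int :=
      (PySem.List.pyRange minmax_rows.1 minmax_rows.2 1).foldl
        (fun acc row => if row ∈ empty_rows then acc + 1 else acc) 0
    let expansions : Int :=
      (PySem.List.pyRange minmax_cols.1 minmax_cols.2 1).foldl
        (fun acc col => if col ∈ empty_cols then acc + 1 else acc) expansions
    dist_no_expansion + expansions * expansion_multiplier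

-- ===== PORT B =====
def fast_short_dist_alt (start : List Int) (end_ : List Int) (expansion_multiplier : Int) (empty_rows : List Int) (empty_cols : List Int) : Int :=
  let s0 := PySem.List.pyGetD start 0 0
  let s1 := PySem.List.pyGetD start 1 0
  let e0 := PySem.List.pyGetD end_ 0 0
  let e1 := PySem.List.pyGetD end_ 1 0
  let dist_no_expansion := |s0 - e0| + |s1 - e1|
  if expansion_multiplier == 0 then dist_no_expansion
  else
    let loR := min s0 e0
    let hiR := max s0 e0
    let loC := min s1 e1
    let hiC := max s1 e1
    -- sum(1 for r in set(empty_rows) if lo <= r < hi) = countP over the Python set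
    let expansions : Int :=
      ((PySem.Set.ofList empty_rows).countP (fun r => decide (loR ≤ r ∧ r < hiR)) : Int)
    let expansions : Int :=
      expansions + ((PySem.Set.ofList empty_cols).countP (fun c => decide (loC ≤ c ∧ c < hiC)) : Int)
    dist_no_expansion + expansions * expansion_multiplier

-- ===== PRECONDITION & SPEC =====
-- A indexes start[0], start[1], end[0], end[1]: inputs where either list is shorter than 2 raise IndexError.
def Pre_fast_short_dist (start : List Int) (end_ : List Int) (expansion_multiplier : Int) (empty_rows : List Int) (empty_cols : List Int) : Prop :=
  2 ≤ start.length ∧ 2 ≤ end_.length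
instance (start : List Int) (end_ : List Int) (expansion_multiplier : Int) (empty_rows : List Int) (empty_cols : List Int) : Decidable (Pre_fast_short_dist start end_ expansion_multiplier empty_rows empty_cols) := by unfold Pre_fast_short_dist; infer_instance
def pvWitness_fast_short_dist : List Int × List Int × Int × List Int × List Int :=
  ([0, 1], [4, 5], 2, [2, 3], [3])
def Spec_fast_short_dist (start : List Int) (end_ : List Int) (expansion_multiplier : Int) (empty_rows : List Int) (empty_cols : List Int) (out : Int) : Prop := out = fast_short_dist_alt start end_ expansion_multiplier empty_rows empty_cols
instance (start : List Int) (end_ : List Int) (expansion_multiplier : Int) (empty_rows : List Int) (empty_cols : List Int) (out : Int) : Decidable (Spec_fast_short_dist start end_ expansion_multiplier empty_rows empty_cols out) := by unfold Spec_fast_short_dist; infer_instance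

-- ===== CLAIM =====
def Claim_equal_fast_short_dist : Prop := ∀ (start : List Int) (end_ : List Int) (expansion_multiplier : Int) (empty_rows : List Int) (empty_cols : List Int), Dom_fast_short_dist start end_ expansion_multiplier empty_rows empty_cols → Pre_fast_short_dist start end_ expansion_multiplier empty_rows empty_cols → Spec_fast_short_dist start end_ expansion_multiplier empty_rows empty_cols (fast_short_dist start end_ expansion_multiplier empty_rows empty_cols)

-- ===== LEMMAS AND PROOFS =====

-- A's counting loop, unfolded: foldl with a 0/1 accumulator is init + countP.
theorem pv_foldl_count (l : List Int) (p : Int → Prop) [DecidablePred p] (c : Int) :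
    l.foldl (fun acc x => if p x then acc + 1 else acc) c = c + (l.countP (fun x => decide (p x)) : Int) := by
  induction l generalizing c with
  | nil => simp
  | cons a t ih =>
    simp only [List.foldl_cons, List.countP_cons, ih]
    by_cases h : p a <;> simp [h] <;> ring

-- the central counting identity: counting coordinates of the span that occur in l
-- equals counting distinct elements of l that lie in the span
theorem pv_count_eq (lo hi : Int) (l : List Int) :
    ((PySem.List.pyRange lo hi 1).countP (fun x => decide (x ∈ l)) : Int)
      = ((PySem.Set.ofList l).countP (fun r => decide (lo ≤ r ∧ r < hi)) : Int) := by
  have h1 : (PySem.List.pyRange lo hi 1).countP (fun x => decide (x ∈ l))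
      = ((PySem.List.pyRange lo hi 1).filter (fun x => decide (x ∈ l))).length := by
    simp [List.countP_eq_length_filter]
  have h2 : (PySem.Set.ofList l).countP (fun r => decide (lo ≤ r ∧ r < hi))
      = ((PySem.Set.ofList l).filter (fun r => decide (lo ≤ r ∧ r < hi))).length := by
    simp [List.countP_eq_length_filter]
  rw [h1, h2]
  have n1 : ((PySem.List.pyRange lo hi 1).filter (fun x => decide (x ∈ l))).Nodup :=
    (PySem.List.nodup_pyRange_one lo hi).filter _
  have n2 : ((PySem.Set.ofList l).filter (fun r => decide (lo ≤ r ∧ r < hi))).Nodup :=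
    (PySem.Set.nodup_ofList l).filter _
  have hperm : ((PySem.List.pyRange lo hi 1).filter (fun x => decide (x ∈ l))).Perm
      ((PySem.Set.ofList l).filter (fun r => decide (lo ≤ r ∧ r < hi))) := by
    rw [List.perm_ext_iff_of_nodup n1 n2]
    intro a
    simp [List.mem_filter, PySem.List.mem_pyRange_one, PySem.Set.mem_ofList]
    tauto
  exact_mod_cast hperm.length_eq

theorem pv_branch (lo1 hi1 lo2 hi2 : Int) (er ec : List Int) :
    (PySem.List.pyRange lo2 hi2 1).foldl
        (fun acc col => if col ∈ ec then acc + 1 else acc)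
        ((PySem.List.pyRange lo1 hi1 1).foldl (fun acc row => if row ∈ er then acc + 1 else acc) 0)
      = ((PySem.Set.ofList er).countP (fun r => decide (lo1 ≤ r ∧ r < hi1)) : Int)
        + ((PySem.Set.ofList ec).countP (fun c => decide (lo2 ≤ c ∧ c < hi2)) : Int) := by
  rw [pv_foldl_count _ (fun x => x ∈ er), pv_foldl_count _ (fun x => x ∈ ec),
      pv_count_eq, pv_count_eq]
  ring

-- ===== VERDICT =====
theorem fast_short_dist_spec : Claim_equal_fast_short_dist := by
  intro start end_ em er ec _ _
  unfold Spec_fast_short_dist fast_short_dist fast_short_dist_alt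
  by_cases hm : em == 0
  · simp [hm]
  · simp only [hm, if_false, Bool.false_eq_true]
    set s0 := PySem.List.pyGetD start 0 0
    set s1 := PySem.List.pyGetD start 1 0
    set e0 := PySem.List.pyGetD end_ 0 0
    set e1 := PySem.List.pyGetD end_ 1 0
    have hr : (if s0 ≤ e0 then (s0, e0) else (e0, s0)) = (min s0 e0, max s0 e0) := by
      by_cases h : s0 ≤ e0
      case pos => simp [h, min_eq_left h, max_eq_right h]
      case neg =>
        have h' : e0 < s0 := lt_of_not_ge h
        simp [h, min_eq_right h'.le, max_eq_left h'.le]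
    have hc : (if s1 ≤ e1 then (s1, e1) else (e1, s1)) = (min s1 e1, max s1 e1) := by
      by_cases h : s1 ≤ e1
      case pos => simp [h, min_eq_left h, max_eq_right h]
      case neg =>
        have h' : e1 < s1 := lt_of_not_ge h
        simp [h, min_eq_right h'.le, max_eq_left h'.le]
    simp only [hr, hc]
    rw [pv_branch]
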